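-- pv_equiv track=rewrite | github.com/nathanhoverter/Courses | Coursera_Bioinformatics_I/Bioinformatics_I_Week2.py | approximate_pattern_match
-- ===== SOURCE A (Python) =====
-- def hamming_distance(string1, string2):
--     """Returns the number of mismatches between string1 and string2
-- 	Args:
-- 		string1(str): the first string
-- 		string2(str): the second string
-- 	Returns:
-- 		int: the number of mismatches between string 1 and string 2
--     """
--     count = 0
--     for i in range(len(string1)):
--         if string1[i] != string2[i]:
--             count = count + 1
--     return count
--
-- def approximate_pattern_match(m, word, genome):
--     """Returns index/indices of approximate matches of word in genome with number of mismatches allowed m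
-- 	Args:
-- 		m(int): the number of mismatches allowed
-- 		word(str): the string to use for searching
-- 		genome(str): the string to be searched
-- 	Returns:
-- 		int: the index/indices of approximate matches of word to genome
--     """
--     match_return = []
--     match_count = []
--     for i in range(0, len(genome)-len(word)+1):
--         match_list = []
--         window = genome[i:i+len(word)]
--         ham_dist = hamming_distance(window, word)
--         if ham_dist <= m:
--             match_return.append(str(i))
--     formatted_list = ' '.join(match_return)
--     return formatted_list
-- ===== SOURCE B (Python) =====
-- def approximate_pattern_match(m, word, genome):
--     """Column-wise re-implementation: accumulate per-offset mismatch counts one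
--     word-position at a time, then emit the offsets whose total is within m."""
--     w = len(genome) - len(word) + 1
--     if w <= 0:
--         return ''
--     counts = [0] * w
--     for j in range(len(word)):
--         c = word[j]
--         counts = [counts[i] + (genome[i + j] != c) for i in range(w)]
--     return ' '.join(str(i) for i in range(w) if counts[i] <= m)
-- ===== Notes on version B (the rewrite author's own statement) =====
-- stated objective: alternative
-- what changed: Replaces A's per-window hamming_distance scan with a column-wise algorithm: one pass per word position accumulating a per-offset mismatch-count table, then emitting the offsets whose total is within m.
import Mathlib
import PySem

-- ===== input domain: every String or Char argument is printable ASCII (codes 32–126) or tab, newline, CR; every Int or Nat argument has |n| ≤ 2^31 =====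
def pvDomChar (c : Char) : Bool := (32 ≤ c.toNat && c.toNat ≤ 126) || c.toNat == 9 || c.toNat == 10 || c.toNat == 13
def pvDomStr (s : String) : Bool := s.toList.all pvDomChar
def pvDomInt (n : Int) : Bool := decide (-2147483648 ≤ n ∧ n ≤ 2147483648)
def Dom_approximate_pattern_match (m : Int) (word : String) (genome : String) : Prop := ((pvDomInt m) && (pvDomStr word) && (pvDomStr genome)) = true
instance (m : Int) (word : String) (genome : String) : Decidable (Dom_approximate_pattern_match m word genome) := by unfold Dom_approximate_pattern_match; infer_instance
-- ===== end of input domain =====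

-- B re-implements A column-wise (one pass per word position over a running counts table)
-- instead of A's per-window hamming_distance helper; objective: alternative structure, same exact output.

-- ===== PORT A =====
-- port of A's helper hamming_distance (Python strings as List Char)
def hamming_distance_port (string1 string2 : List Char) : Int :=
  (PySem.List.pyRange 0 (string1.length : Int)).foldl
    (fun count i =>
      if PySem.List.pyGet? string1 i ≠ PySem.List.pyGet? string2 i then count + 1 else count) 0

def approximate_pattern_match (m : Int) (word : String) (genome : String) : String :=
  let wl := word.toList
  let gl := genome.toList
  let match_return :=
    (PySem.List.pyRange 0 ((gl.length : Int) - (wl.length : Int) + 1)).foldl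
      (fun acc i =>
        let window := PySem.List.slice gl (some i) (some (i + (wl.length : Int)))
        let ham_dist := hamming_distance_port window wl
        if ham_dist ≤ m then acc ++ [PySem.Int.toStr i] else acc) []
  PySem.Str.join " " match_return

-- ===== PORT B =====
def approximate_pattern_match_alt (m : Int) (word : String) (genome : String) : String :=
  let gl := genome.toList
  let wl := word.toList
  let w : Int := (gl.length : Int) - (wl.length : Int) + 1
  if w ≤ 0 then "" else
    let counts :=
      (PySem.List.pyRange 0 (wl.length : Int)).foldl
        (fun cs j =>
          let c := PySem.List.pyGet? wl j
          (PySem.List.pyRange 0 w).map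
            (fun i => PySem.List.pyGetD cs i 0 +
              (if PySem.List.pyGet? gl (i + j) ≠ c then 1 else 0)))
        (List.replicate w.toNat 0)
    PySem.Str.join " "
      (((PySem.List.pyRange 0 w).filter (fun i => decide (PySem.List.pyGetD counts i 0 ≤ m))).map
        PySem.Int.toStr)

-- ===== PRECONDITION & SPEC =====
def Spec_approximate_pattern_match (m : Int) (word : String) (genome : String) (out : String) : Prop := out = approximate_pattern_match_alt m word genome
instance (m : Int) (word : String) (genome : String) (out : String) : Decidable (Spec_approximate_pattern_match m word genome out) := by unfold Spec_approximate_pattern_match; infer_instance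

-- ===== CLAIM (what is proved, stated in full; the proofs are below) =====
def Claim_equal_approximate_pattern_match : Prop := ∀ (m : Int) (word : String) (genome : String), Dom_approximate_pattern_match m word genome → Spec_approximate_pattern_match m word genome (approximate_pattern_match m word genome)

-- ===== LEMMAS AND PROOFS =====

-- the number of mismatches of the window at offset i, counted over word positions
def pvMism (gl wl : List Char) (i : Nat) : Nat :=
  List.countP (fun j => decide (gl[i + j]? ≠ wl[j]?)) (List.range wl.length)

-- A's hamming distance of the window at a valid offset equals pvMism
lemma hamming_window (gl wl : List Char) (i : Nat) (h : i + wl.length ≤ gl.length) :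
    hamming_distance_port (PySem.List.slice gl (some (i : Int)) (some ((i : Int) + (wl.length : Int)))) wl
      = (pvMism gl wl i : Int) := by
  have hcast : ((i : Int) + (wl.length : Int)) = ((i + wl.length : Nat) : Int) := by push_cast; ring
  rw [hcast, PySem.List.slice_natCast]
  have hw : List.take (i + wl.length - i) (List.drop i gl) = List.take wl.length (List.drop i gl) := by
    congr 1; omega
  rw [hw]
  set win := List.take wl.length (List.drop i gl) with hwin
  have hlen : win.length = wl.length := by
    simp only [hwin, List.length_take, List.length_drop]; omega
  unfold hamming_distance_port
  rw [hlen]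
  have hstep : (fun (count : Int) (j : Int) =>
      if PySem.List.pyGet? win j ≠ PySem.List.pyGet? wl j then count + 1 else count)
      = (fun (count : Int) (j : Int) =>
          if (fun j => decide (PySem.List.pyGet? win j ≠ PySem.List.pyGet? wl j)) j = true
          then count + 1 else count) := by
    funext count j; simp only [decide_eq_true_eq]
  rw [hstep, PySem.List.foldl_count_if, zero_add, PySem.List.pyRange_zero_natCast,
      List.countP_map, pvMism]
  congr 1
  apply List.countP_congr
  intro j hj
  simp only [List.mem_range] at hj
  simp only [Function.comp_apply, PySem.List.pyGet?_natCast]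
  have : win[j]? = gl[i + j]? := by
    simp only [hwin, List.getElem?_take, List.getElem?_drop, if_pos hj]
  rw [this]

-- B's counts table after processing the first kn word positions
lemma counts_loop (gl wl : List Char) (w : Nat) (kn : Nat) :
    (PySem.List.pyRange 0 (kn : Int)).foldl
        (fun cs j =>
          (PySem.List.pyRange 0 (w : Int)).map
            (fun i => PySem.List.pyGetD cs i 0 +
              (if PySem.List.pyGet? gl (i + j) ≠ PySem.List.pyGet? wl j then 1 else 0)))
        (List.replicate w 0)
      = (List.range w).map
          (fun i => (List.countP (fun j => decide (gl[i + j]? ≠ wl[j]?)) (List.range kn) : Int)) := by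
  induction kn with
  | zero =>
      have h0 : PySem.List.pyRange 0 ((0 : Nat) : Int) = [] := by
        rw [PySem.List.pyRange_zero_natCast]; simp
      rw [h0, List.foldl_nil]
      simp [List.range_zero, List.map_const', List.length_range]
  | succ kn ih =>
      have hc : ((kn + 1 : Nat) : Int) = (kn : Int) + 1 := by push_cast; ring
      rw [hc, PySem.List.pyRange_one_succ_right (Int.natCast_nonneg kn), List.foldl_append,
          ih, List.foldl_cons, List.foldl_nil, PySem.List.pyRange_zero_natCast, List.map_map]
      apply List.map_congr_left
      intro i hi
      simp only [List.mem_range] at hi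
      simp only [Function.comp_apply]
      rw [PySem.List.pyGetD_natCast,
          PySem.List.getD_map_range _ w i 0 hi]
      have h2 : ((i : Int) + (kn : Int)) = ((i + kn : Nat) : Int) := by push_cast; ring
      rw [h2, PySem.List.pyGet?_natCast, PySem.List.pyGet?_natCast,
          List.range_succ, List.countP_append]
      push_cast
      simp only [List.countP_cons, List.countP_nil, decide_eq_true_eq]
      split_ifs <;> simp

-- ===== VERDICT (by name: the statement is the Claim_ definition above) =====
theorem approximate_pattern_match_spec : Claim_equal_approximate_pattern_match := by
  unfold Claim_equal_approximate_pattern_match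
  intro m word genome _
  unfold Spec_approximate_pattern_match approximate_pattern_match approximate_pattern_match_alt
  dsimp only
  set gl := genome.toList with hgl
  set wl := word.toList with hwl
  by_cases h : (gl.length : Int) - (wl.length : Int) + 1 ≤ 0
  · rw [if_pos h]
    have hempty : PySem.List.pyRange 0 ((gl.length : Int) - (wl.length : Int) + 1) = [] := by
      simp [PySem.List.pyRange, h]
    rw [hempty, List.foldl_nil]
    rfl
  · rw [if_neg h]
    have hk : wl.length ≤ gl.length := by omega
    set w : Nat := gl.length - wl.length + 1 with hwdef
    have hNw : (gl.length : Int) - (wl.length : Int) + 1 = (w : Int) := by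
      rw [hwdef]; push_cast; omega
    rw [hNw, Int.toNat_natCast, counts_loop gl wl w wl.length]
    -- A's fold in append-if shape
    have hfunA : (fun (acc : List String) (i : Int) =>
        if hamming_distance_port (PySem.List.slice gl (some i) (some (i + (wl.length : Int)))) wl ≤ m
        then acc ++ [PySem.Int.toStr i] else acc)
        = (fun (acc : List String) (i : Int) =>
            if (fun i => decide (hamming_distance_port
                  (PySem.List.slice gl (some i) (some (i + (wl.length : Int)))) wl ≤ m)) i = true
            then acc ++ [(fun i : Int => PySem.Int.toStr i) i] else acc) := by
      funext acc i; simp only [decide_eq_true_eq]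
    rw [hfunA, PySem.List.foldl_append_if, List.nil_append,
        PySem.List.pyRange_zero_natCast, List.filter_map, List.map_map,
        List.filter_map, List.map_map]
    simp only [Function.comp_def]
    congr 1
    refine congrArg _ (List.filter_congr ?_)
    intro i hi
    simp only [List.mem_range] at hi
    simp only [decide_eq_decide]
    have hbound : i + wl.length ≤ gl.length := by omega
    rw [hamming_window gl wl i hbound, PySem.List.pyGetD_natCast,
        PySem.List.getD_map_range _ w i 0 hi]
    rw [pvMism]
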